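-- pv_equiv track=rewrite | github.com/siddhartharao17/hackerrank | src/nested-lists.py | createStudentDict
-- ===== SOURCE A (Python) =====
-- def createStudentDict(student_list):
--     student_dict = {}
--     for name, score in student_list:
--         if score not in student_dict.keys():
--             student_dict[score] = [name]
--         else:
--             student_dict[score].append(name)
--     return student_dict
-- ===== SOURCE B (Python) =====
-- def createStudentDict(student_list):
--     # Two-pass decomposition: dedup the scores in first-appearance order,
--     # then build each group with one comprehension per distinct score.
--     seen = []
--     for _, score in student_list:
--         if score not in seen:
--             seen.append(score)
--     return {s: [name for name, sc in student_list if sc == s] for s in seen}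
-- ===== Notes on version B (the rewrite author's own statement) =====
-- stated objective: alternative
-- what changed: A builds the dict in one incremental pass (lookup, insert-or-append per student); B first collects the distinct scores in first-appearance order and then builds each group with a separate filtering pass over the list.
import Mathlib
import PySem

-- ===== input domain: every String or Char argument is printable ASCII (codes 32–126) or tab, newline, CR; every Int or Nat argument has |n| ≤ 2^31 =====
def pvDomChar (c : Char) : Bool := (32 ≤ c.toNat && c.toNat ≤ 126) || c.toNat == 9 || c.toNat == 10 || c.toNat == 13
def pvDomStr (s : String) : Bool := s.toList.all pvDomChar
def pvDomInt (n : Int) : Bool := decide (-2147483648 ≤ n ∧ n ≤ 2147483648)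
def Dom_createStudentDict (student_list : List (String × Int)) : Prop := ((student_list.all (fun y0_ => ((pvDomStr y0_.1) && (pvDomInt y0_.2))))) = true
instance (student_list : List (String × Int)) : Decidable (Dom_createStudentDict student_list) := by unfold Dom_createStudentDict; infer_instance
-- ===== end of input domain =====

-- ===== PORT A =====
-- One honest line: B groups by two passes (dedup scores, then filter per score) instead of
-- A's incremental dict pass; alternative decomposition, same return value.
def createStudentDict (student_list : List (String × Int)) : List (Int × List String) :=
  (student_list.foldl
    (fun d p =>
      if p.2 ∉ d.keys then d.insert p.2 [p.1]
      else d.modify p.2 [] (fun l => l ++ [p.1]))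
    PySem.Dict.empty).items

-- ===== PORT B =====
def createStudentDict_alt (student_list : List (String × Int)) : List (Int × List String) :=
  let seen : PySem.Set Int :=
    student_list.foldl (fun acc p => PySem.Set.add acc p.2) PySem.Set.empty
  seen.map (fun s => (s, (student_list.filter (fun p => p.2 == s)).map (·.1)))

-- ===== PRECONDITION & SPEC =====
def Spec_createStudentDict (student_list : List (String × Int)) (out : List (Int × List String)) : Prop := out = createStudentDict_alt student_list
instance (student_list : List (String × Int)) (out : List (Int × List String)) : Decidable (Spec_createStudentDict student_list out) := by unfold Spec_createStudentDict; infer_instance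

-- ===== CLAIM (what is proved, stated in full; the proofs are below) =====
def Claim_equal_createStudentDict : Prop := ∀ (student_list : List (String × Int)), Dom_createStudentDict student_list → Spec_createStudentDict student_list (createStudentDict student_list)

-- ===== LEMMAS AND PROOFS =====

-- On a missing key, A's insert branch is the same step as an unconditional modify-append.
theorem pv_body_modify (d : PySem.Dict Int (List String)) (p : String × Int) :
    (if p.2 ∉ d.keys then d.insert p.2 [p.1] else d.modify p.2 [] (fun l => l ++ [p.1]))
      = d.modify p.2 [] (fun l => l ++ [p.1]) := by
  by_cases h : p.2 ∈ d.keys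
  · simp [h]
  · have hc : d.contains p.2 = false := by
      rw [Bool.eq_false_iff]
      intro hct
      exact h ((PySem.Dict.contains_iff_mem_keys d p.2).mp hct)
    simp [h, PySem.Dict.modify, PySem.Dict.getD_of_not_contains, hc]

-- Each group of the modify-append loop is the filtered names, for every key.
theorem pv_getD_loop (sl : List (String × Int)) (c : Int) :
    (sl.foldl (fun d p => d.modify p.2 [] (fun l => l ++ [p.1]))
        (PySem.Dict.empty : PySem.Dict Int (List String))).getD c []
      = (sl.filter (fun p => p.2 == c)).map (·.1) := by
  have hm : sl.foldl (fun d p => d.modify p.2 [] (fun l => l ++ [p.1]))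
        (PySem.Dict.empty : PySem.Dict Int (List String))
      = ((sl.map (fun p => (p.2, p.1))).foldl
          (fun d q => d.modify q.1 [] (fun l => l ++ [q.2])) PySem.Dict.empty) := by
    rw [List.foldl_map]
  rw [hm, PySem.Dict.getD_foldl_modify_append]
  simp [List.filter_map, List.map_map, Function.comp_def]

-- ===== VERDICT (by name: the statement is the Claim_ definition above) =====
theorem createStudentDict_spec : Claim_equal_createStudentDict := by
  intro sl _
  unfold Spec_createStudentDict createStudentDict createStudentDict_alt
  simp only [pv_body_modify]
  set L := sl.foldl (fun d p => d.modify p.2 [] (fun l => l ++ [p.1]))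
      (PySem.Dict.empty : PySem.Dict Int (List String)) with hL
  have hnd : L.keys.Nodup := by
    rw [hL]
    exact PySem.Dict.nodup_keys_foldl_modify_key sl (fun p => p.2) []
      (fun _ p => fun l => l ++ [p.1]) PySem.Dict.empty PySem.Dict.nodup_keys_empty
  have hkeys : L.keys = sl.foldl (fun acc p => PySem.Set.add acc p.2) PySem.Set.empty := by
    rw [hL, PySem.Dict.keys_foldl_modify_key, ← PySem.Set.update_map_eq_foldl_add]
    simp [PySem.Dict.keys_empty, PySem.Set.empty]
  rw [PySem.Dict.items_eq_map_keys L hnd [], hkeys]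
  exact List.map_congr_left (fun k _ => by rw [hL, pv_getD_loop])
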